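-- pv_equiv track=rewrite | github.com/jonleewh/DSA4264-Project | src/create_test/legacy/build_cleaned_module_rows.py | is_undergrad_code
-- ===== SOURCE A (Python) =====
-- def is_undergrad_code(code: str | None) -> bool:
--     if not code:
--         return False
--     code = code.strip().upper()
--     prefix = []
--     digits = []
--     for ch in code:
--         if ch.isalpha() and not digits:
--             prefix.append(ch)
--         elif ch.isdigit():
--             digits.append(ch)
--             break
--         elif prefix:
--             break
--     return bool(prefix and digits and digits[0] in "01234")
-- ===== SOURCE B (Python) =====
-- def is_undergrad_code(code):
--     if not code:
--         return False
--     s = code.strip().upper()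
--     i, n = 0, len(s)
--     while i < n and not s[i].isalnum():
--         i += 1
--     j = i
--     while j < n and s[j].isalpha():
--         j += 1
--     return j > i and j < n and s[j] in "01234"
-- ===== Notes on version B (the rewrite author's own statement) =====
-- stated objective: simpler
-- what changed: Replaces A's accumulate-into-prefix/digits-lists loop with two plain index scans (skip non-alphanumerics, then skip letters) followed by a single membership test on the next character; no lists are built.
import Mathlib
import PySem

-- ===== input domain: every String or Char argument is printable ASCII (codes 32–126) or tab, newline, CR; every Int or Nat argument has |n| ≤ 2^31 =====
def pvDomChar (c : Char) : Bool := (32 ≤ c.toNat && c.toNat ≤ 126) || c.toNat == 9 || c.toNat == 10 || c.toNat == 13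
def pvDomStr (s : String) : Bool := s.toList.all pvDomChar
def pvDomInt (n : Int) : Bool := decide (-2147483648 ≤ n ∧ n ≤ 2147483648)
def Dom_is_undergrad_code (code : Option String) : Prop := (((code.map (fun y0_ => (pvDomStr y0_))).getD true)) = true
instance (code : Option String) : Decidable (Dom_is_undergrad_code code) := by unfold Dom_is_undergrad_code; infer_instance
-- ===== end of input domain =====

-- B replaces A's accumulate-into-lists loop with two plain index scans (skip
-- non-alphanumerics, skip letters) and a final test on the next character: simpler.

-- ===== PORT A =====
-- A's for-loop with its two accumulator lists and early breaks, transcribed as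
-- structural recursion over the characters with state (prefix, digits).
def pvALoop : List Char → List Char → List Char → (List Char × List Char)
  | [], pre, digs => (pre, digs)
  | ch :: rest, pre, digs =>
    if PySem.Chars.isalpha ch && digs.isEmpty then
      pvALoop rest (pre ++ [ch]) digs
    else if PySem.Chars.isdigit ch then
      (pre, digs ++ [ch])                 -- break
    else if !pre.isEmpty then
      (pre, digs)                         -- break
    else
      pvALoop rest pre digs

-- A's final boolean from the loop state: bool(prefix and digits and digits[0] in "01234")
def pvFinal (r : List Char × List Char) : Bool :=
  !r.1.isEmpty && !r.2.isEmpty &&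
    (match r.2 with
     | d :: _ => ("01234".toList.contains d)
     | [] => false)

def is_undergrad_code (code : Option String) : Bool :=
  match code with
  | none => false                                        -- `if not code`
  | some s =>
    if s.toList.isEmpty then false                       -- `if not code`
    else
      let cs := (PySem.Str.upper (PySem.Str.strip s)).toList
      pvFinal (pvALoop cs [] [])

-- ===== PORT B =====
-- Source B's first while loop: advance past non-alphanumeric characters
def pvSkipNonAlnum : List Char → List Char
  | [] => []
  | c :: rest => if !(PySem.Chars.isalnum c) then pvSkipNonAlnum rest else c :: rest

-- Source B's second while loop: advance past letters
def pvSkipAlpha : List Char → List Char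
  | [] => []
  | c :: rest => if PySem.Chars.isalpha c then pvSkipAlpha rest else c :: rest

-- Source B's final membership test: j < n and s[j] in "01234"
def pvTail (u : List Char) : Bool :=
  match u with
  | c :: _ => ("01234".toList.contains c)
  | [] => false

def is_undergrad_code_alt (code : Option String) : Bool :=
  match code with
  | none => false
  | some s =>
    if s.toList.isEmpty then false
    else
      let cs := (PySem.Str.upper (PySem.Str.strip s)).toList
      let t := pvSkipNonAlnum cs          -- position i, as the remaining suffix
      let u := pvSkipAlpha t              -- position j, as the remaining suffix
      -- j > i ∧ j < n ∧ s[j] in "01234"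
      decide (u.length < t.length) && pvTail u

-- ===== PRECONDITION & SPEC =====
def Spec_is_undergrad_code (code : Option String) (out : Bool) : Prop := out = is_undergrad_code_alt code
instance (code : Option String) (out : Bool) : Decidable (Spec_is_undergrad_code code out) := by unfold Spec_is_undergrad_code; infer_instance

-- ===== CLAIM (what is proved, stated in full; the proofs are below) =====
def Claim_equal_is_undergrad_code : Prop := ∀ (code : Option String), Dom_is_undergrad_code code → Spec_is_undergrad_code code (is_undergrad_code code)

-- ===== LEMMAS AND PROOFS =====

lemma skipAlpha_length_le (cs : List Char) : (pvSkipAlpha cs).length ≤ cs.length := by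
  induction cs with
  | nil => simp [pvSkipAlpha]
  | cons c rest ih =>
    simp only [pvSkipAlpha]
    split
    · exact ih.trans (Nat.le_succ _)
    · simp

-- phase 2: once prefix is non-empty (and digits empty), A's loop agrees with B's letter scan
lemma phase2 (cs pre : List Char) (hpre : pre ≠ []) :
    pvFinal (pvALoop cs pre []) = pvTail (pvSkipAlpha cs) := by
  induction cs generalizing pre with
  | nil =>
    simp [pvALoop, pvSkipAlpha, pvFinal, pvTail]
  | cons c rest ih =>
    simp only [pvALoop, pvSkipAlpha, List.isEmpty_nil, Bool.and_true]
    by_cases ha : PySem.Chars.isalpha c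
    · simpa [ha] using ih (pre ++ [c]) (by simp)
    · by_cases hd : PySem.Chars.isdigit c
      · simp [ha, hd, pvFinal, pvTail, hpre]
      · simp [ha, hd, pvFinal, pvTail, hpre]
        refine ⟨?_, ?_, ?_, ?_, ?_⟩ <;> rintro rfl <;> exact hd (by decide)

-- phase 1: from the empty state, A's loop agrees with B's full scan
lemma phase1 (cs : List Char) :
    pvFinal (pvALoop cs [] []) =
      (decide ((pvSkipAlpha (pvSkipNonAlnum cs)).length < (pvSkipNonAlnum cs).length)
        && pvTail (pvSkipAlpha (pvSkipNonAlnum cs))) := by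
  induction cs with
  | nil => simp [pvALoop, pvSkipNonAlnum, pvSkipAlpha, pvFinal, pvTail]
  | cons c rest ih =>
    simp only [pvALoop, pvSkipNonAlnum, List.isEmpty_nil, Bool.and_true]
    by_cases ha : PySem.Chars.isalpha c
    · have halnum : PySem.Chars.isalnum c = true := by
        simp [PySem.Chars.isalnum, ha]
      simp [ha, halnum, pvSkipAlpha, phase2 rest [c] (by simp)]
      exact fun _ => skipAlpha_length_le rest
    · by_cases hd : PySem.Chars.isdigit c
      · have halnum : PySem.Chars.isalnum c = true := by
          simp [PySem.Chars.isalnum, hd]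
        simp [ha, hd, halnum, pvSkipAlpha, pvFinal]
      · have halnum : PySem.Chars.isalnum c = false := by
          simp [PySem.Chars.isalnum, ha, hd]
        simpa [ha, hd, halnum] using ih

-- ===== VERDICT (by name: the statement is the Claim_ definition above) =====
theorem is_undergrad_code_spec : Claim_equal_is_undergrad_code := by
  intro code _
  unfold Spec_is_undergrad_code is_undergrad_code is_undergrad_code_alt
  match code with
  | none => rfl
  | some s =>
    cases h : s.toList.isEmpty
    · simp only [h, Bool.false_eq_true, if_false]
      exact phase1 ((PySem.Str.upper (PySem.Str.strip s)).toList)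
    · simp [h]
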